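-- pv_equiv track=rewrite | github.com/R2D2oid/OOD-Sentence-Detection | corpus.py | split_sentence_on_punctuations
-- ===== SOURCE A (Python) =====
-- def split_sentence_on_punctuations(line):
-- 	puncts = ['.', '?', '!', ',', ';', ':']
-- 	for p in puncts:
-- 		line = line.replace(p, '.')
-- 	sents = line.split('.')
-- 	sents = [s.replace(')', '').replace('(', '').replace('*', '').strip() for s in sents]
-- 	sents = [s for s in sents if len(s)>3]
-- 	return sents
-- ===== SOURCE B (Python) =====
-- def split_sentence_on_punctuations(line):
--     delims = '.?!,;:'
--     segs = []
--     buf = []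
--     for ch in line:
--         if ch in delims:
--             segs.append(buf)
--             buf = []
--         else:
--             buf.append(ch)
--     segs.append(buf)
--     out = []
--     for seg in segs:
--         s = ''.join(c for c in seg if c not in ')(*').strip()
--         if len(s) > 3:
--             out.append(s)
--     return out
-- ===== Notes on version B (the rewrite author's own statement) =====
-- stated objective: alternative
-- what changed: Replaces A's six full replace passes followed by a str.split pass and a per-segment chain of three replace passes with a single character scan that buffers tokens and splits at any punctuation mark, plus a single per-segment character filter.
import Mathlib
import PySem

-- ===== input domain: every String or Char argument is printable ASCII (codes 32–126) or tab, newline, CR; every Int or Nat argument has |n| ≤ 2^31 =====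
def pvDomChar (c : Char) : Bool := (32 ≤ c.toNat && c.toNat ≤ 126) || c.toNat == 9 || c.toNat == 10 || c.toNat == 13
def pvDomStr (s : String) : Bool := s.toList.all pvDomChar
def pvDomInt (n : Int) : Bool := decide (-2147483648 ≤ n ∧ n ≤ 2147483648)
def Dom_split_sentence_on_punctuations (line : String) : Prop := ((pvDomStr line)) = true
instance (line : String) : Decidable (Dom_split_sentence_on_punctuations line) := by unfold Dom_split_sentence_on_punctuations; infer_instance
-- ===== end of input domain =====

-- B replaces A's multi-pass normalize-replace-then-split by a single tokenizing scan; same output, same cost class.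

-- ===== PORT A =====
-- A's per-segment cleaning: s.replace(')','').replace('(','').replace('*','').strip()
def pvCleanA (s : List Char) : List Char :=
  PySem.Chars.strip (PySem.Chars.replace (PySem.Chars.replace (PySem.Chars.replace s [')'] []) ['('] []) ['*'] [])

def split_sentence_on_punctuations (line : String) : List String :=
  let puncts : List Char := ['.', '?', '!', ',', ';', ':']
  let l := puncts.foldl (fun acc p => PySem.Chars.replace acc [p] ['.']) line.toList
  let sents := PySem.Chars.splitOn l ['.']
  let sents := sents.map pvCleanA
  let sents := sents.filter (fun s => s.length > 3)
  sents.map String.mk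

-- ===== PORT B =====
def pvDelims : List Char := ['.', '?', '!', ',', ';', ':']

-- one step of B's scan: close the buffered token at a delimiter, else extend the buffer
def pvStep (st : List (List Char) × List Char) (c : Char) : List (List Char) × List Char :=
  if c ∈ pvDelims then (st.1 ++ [st.2], []) else (st.1, st.2 ++ [c])

-- B's per-segment cleaning: drop ')','(','*' characters, then strip
def pvCleanB (seg : List Char) : List Char :=
  PySem.Chars.strip (seg.filter (fun c => !(c ∈ [')', '(', '*'])))

def split_sentence_on_punctuations_alt (line : String) : List String :=
  let st := line.toList.foldl pvStep ([], [])
  let segs := st.1 ++ [st.2]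
  segs.foldl (fun out seg =>
    let s := pvCleanB seg
    if s.length > 3 then out ++ [String.mk s] else out) []

-- ===== PRECONDITION & SPEC =====
def Spec_split_sentence_on_punctuations (line : String) (out : List String) : Prop := out = split_sentence_on_punctuations_alt line
instance (line : String) (out : List String) : Decidable (Spec_split_sentence_on_punctuations line out) := by unfold Spec_split_sentence_on_punctuations; infer_instance

-- ===== CLAIM (what is proved, stated in full; the proofs are below) =====
def Claim_equal_split_sentence_on_punctuations : Prop := ∀ (line : String), Dom_split_sentence_on_punctuations line → Spec_split_sentence_on_punctuations line (split_sentence_on_punctuations line)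

-- ===== LEMMAS AND PROOFS =====

-- single-char replace is a flatMap
theorem repl_go (a : Char) (new : List Char) : ∀ (fuel : Nat) (l acc : List Char), l.length ≤ fuel →
    PySem.Chars.replace.go [a] new fuel l acc
      = acc.reverse ++ l.flatMap (fun c => if c = a then new else [c]) := by
  intro fuel
  induction fuel with
  | zero =>
    intro l acc h
    have : l = [] := List.eq_nil_of_length_eq_zero (Nat.le_zero.mp h)
    subst this
    simp [PySem.Chars.replace.go]
  | succ n ih =>
    intro l acc h
    cases l with
    | nil => simp [PySem.Chars.replace.go]
    | cons c t =>
      by_cases hc : c = a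
      · subst hc
        have hpre : List.isPrefixOf [c] (c :: t) = true := by simp [List.isPrefixOf]
        rw [PySem.Chars.replace.go]
        simp only [hpre, if_pos]
        rw [ih _ _ (by simpa using Nat.le_of_succ_le_succ h)]
        simp
      · have hpre : List.isPrefixOf [a] (c :: t) = false := by
          simp [List.isPrefixOf]; exact fun h' => hc h'.symm
        rw [PySem.Chars.replace.go]
        simp only [hpre, Bool.false_eq_true, if_false]
        rw [ih t (c :: acc) (by simpa using Nat.le_of_succ_le_succ h)]
        simp [hc]

theorem replace_single (a : Char) (new cs : List Char) :
    PySem.Chars.replace cs [a] new = cs.flatMap (fun c => if c = a then new else [c]) := by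
  simp [PySem.Chars.replace]
  rw [repl_go a new cs.length cs [] le_rfl]
  simp

theorem replace_map (a b : Char) (cs : List Char) :
    PySem.Chars.replace cs [a] [b] = cs.map (fun c => if c = a then b else c) := by
  rw [replace_single]
  induction cs with
  | nil => simp
  | cons c t ih => simp [ih]; split <;> simp

theorem replace_del (a : Char) (cs : List Char) :
    PySem.Chars.replace cs [a] [] = cs.filter (fun c => !(c == a)) := by
  rw [replace_single]
  induction cs with
  | nil => simp
  | cons c t ih => by_cases h : c = a <;> simp [h, ih]

def punctNorm (c : Char) : Char := if c ∈ pvDelims then '.' else c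

theorem punctNorm_eq_dot_iff (c : Char) : punctNorm c = '.' ↔ c ∈ pvDelims := by
  unfold punctNorm
  split
  · simp_all
  · constructor
    · intro h; subst h; simp [pvDelims]
    · intro h; simp_all

theorem replAll_eq_map (cs : List Char) :
    (['.', '?', '!', ',', ';', ':'] : List Char).foldl
        (fun acc p => PySem.Chars.replace acc [p] ['.']) cs
      = cs.map punctNorm := by
  simp only [List.foldl_cons, List.foldl_nil, replace_map, List.map_map]
  apply List.map_congr_left
  intro c _
  simp only [Function.comp]
  by_cases h : c ∈ pvDelims
  · simp only [pvDelims, List.mem_cons, List.not_mem_nil, or_false] at h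
    rcases h with h|h|h|h|h|h <;> subst h <;> decide
  · simp only [pvDelims, List.mem_cons, List.not_mem_nil, or_false] at h
    push Not at h
    obtain ⟨h1, h2, h3, h4, h5, h6⟩ := h
    simp [punctNorm, pvDelims, h1, h2, h3, h4, h5, h6]

-- proof-only spec of the tokenizing scan
def pvScan : List Char → List Char → List (List Char)
  | [], buf => [buf]
  | c :: t, buf => if c ∈ pvDelims then buf :: pvScan t [] else pvScan t (buf ++ [c])

theorem split_go : ∀ (fuel : Nat) (l cur : List Char) (acc : List (List Char)), l.length ≤ fuel →
    PySem.Chars.splitOn.go ['.'] fuel (l.map punctNorm) cur acc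
      = acc.reverse ++ pvScan l cur.reverse := by
  intro fuel
  induction fuel with
  | zero =>
    intro l cur acc h
    have : l = [] := List.eq_nil_of_length_eq_zero (Nat.le_zero.mp h)
    subst this
    simp [PySem.Chars.splitOn.go, pvScan]
  | succ n ih =>
    intro l cur acc h
    cases l with
    | nil => simp [PySem.Chars.splitOn.go, pvScan]
    | cons c t =>
      by_cases hc : c ∈ pvDelims
      · have hdot : punctNorm c = '.' := (punctNorm_eq_dot_iff c).mpr hc
        have hpre : List.isPrefixOf ['.'] (punctNorm c :: t.map punctNorm) = true := by
          simp [List.isPrefixOf, hdot]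
        rw [List.map_cons, PySem.Chars.splitOn.go]
        simp only [hpre, if_pos]
        rw [show (punctNorm c :: t.map punctNorm).drop ['.'].length = t.map punctNorm by simp]
        rw [ih t [] _ (by simpa using Nat.le_of_succ_le_succ h)]
        simp [pvScan, hc]
      · have hdot : ¬ punctNorm c = '.' := fun h' => hc ((punctNorm_eq_dot_iff c).mp h')
        have hpre : List.isPrefixOf ['.'] (punctNorm c :: t.map punctNorm) = false := by
          simp [List.isPrefixOf]; exact fun h' => hdot h'.symm
        rw [List.map_cons, PySem.Chars.splitOn.go]
        simp only [hpre]
        rw [ih t (punctNorm c :: cur) _ (by simpa using Nat.le_of_succ_le_succ h)]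
        have hid : punctNorm c = c := by simp [punctNorm, hc]
        simp [pvScan, hc, hid]

theorem splitOn_scan (l : List Char) :
    PySem.Chars.splitOn (l.map punctNorm) ['.'] = pvScan l [] := by
  simp only [PySem.Chars.splitOn]
  rw [split_go ((l.map punctNorm).length + 1) l [] [] (by simp)]
  simp

theorem foldB : ∀ (l : List Char) (segs : List (List Char)) (buf : List Char),
    ((l.foldl pvStep (segs, buf)).1 ++ [(l.foldl pvStep (segs, buf)).2]) = segs ++ pvScan l buf := by
  intro l
  induction l with
  | nil => intro segs buf; simp [pvScan]
  | cons c t ih =>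
    intro segs buf
    by_cases h : c ∈ pvDelims <;> simp [pvStep, h, pvScan, ih]

theorem clean_eq (s : List Char) : pvCleanA s = pvCleanB s := by
  unfold pvCleanA pvCleanB
  simp only [replace_del, List.filter_filter]
  congr 1
  apply List.filter_congr
  intro c _
  by_cases h1 : c = ')' <;> by_cases h2 : c = '(' <;> by_cases h3 : c = '*' <;>
    simp [h1, h2, h3]

theorem foldOut : ∀ (segs : List (List Char)) (out : List String),
    segs.foldl (fun out seg =>
        let s := pvCleanB seg
        if s.length > 3 then out ++ [String.mk s] else out) out
      = out ++ (((segs.map pvCleanB).filter (fun s => s.length > 3)).map String.mk) := by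
  intro segs
  induction segs with
  | nil => intro out; simp
  | cons seg t ih =>
    intro out
    by_cases h : (pvCleanB seg).length > 3 <;> simp [h, ih]

-- ===== VERDICT (by name: the statement is the Claim_ definition above) =====
theorem split_sentence_on_punctuations_spec : Claim_equal_split_sentence_on_punctuations := by
  intro line _
  unfold Spec_split_sentence_on_punctuations
  simp only [split_sentence_on_punctuations, split_sentence_on_punctuations_alt,
    replAll_eq_map, splitOn_scan, foldB, foldOut, List.nil_append]
  rw [show pvCleanA = pvCleanB from funext clean_eq]
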